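-- pv_equiv track=rewrite | github.com/JesseRed/analyse_SRT | src/chunking/benchmark_eval.py | _boundaries_to_labels
-- ===== SOURCE A (Python) =====
-- def _boundaries_to_labels(boundaries: list[int], n_positions: int = 7) -> list[int]:
--     """Convert chunk_boundaries (list of boundary positions 1..7) to cluster labels 0..K-1."""
--     if not boundaries:
--         return list(range(n_positions))
--     boundaries = sorted(set(boundaries))
--     labels = []
--     c = 0
--     for pos in range(1, n_positions + 1):
--         if pos in boundaries:
--             c += 1
--         labels.append(c)
--     return labels
-- ===== SOURCE B (Python) =====
-- def _boundaries_to_labels(boundaries: list[int], n_positions: int = 7) -> list[int]: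
--     """Convert chunk_boundaries (list of boundary positions 1..7) to cluster labels 0..K-1."""
--     if not boundaries:
--         return list(range(n_positions))
--     sb = sorted(set(boundaries))
--     labels = []
--     c = 0
--     prev = 1
--     for b in sb:
--         if b < 1:
--             continue
--         if b > n_positions:
--             break
--         labels.extend([c] * (b - prev))
--         c += 1
--         prev = b
--     labels.extend([c] * (n_positions - prev + 1))
--     return labels
-- ===== Notes on version B (the rewrite author's own statement) =====
-- stated objective: faster
-- what changed: Instead of scanning the sorted boundary list for membership at every position 1..n, B makes a single pass over the sorted distinct boundaries and emits each constant-label run ([c] * run_length) at once, so the per-position inner membership scan disappears.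
import Mathlib
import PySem

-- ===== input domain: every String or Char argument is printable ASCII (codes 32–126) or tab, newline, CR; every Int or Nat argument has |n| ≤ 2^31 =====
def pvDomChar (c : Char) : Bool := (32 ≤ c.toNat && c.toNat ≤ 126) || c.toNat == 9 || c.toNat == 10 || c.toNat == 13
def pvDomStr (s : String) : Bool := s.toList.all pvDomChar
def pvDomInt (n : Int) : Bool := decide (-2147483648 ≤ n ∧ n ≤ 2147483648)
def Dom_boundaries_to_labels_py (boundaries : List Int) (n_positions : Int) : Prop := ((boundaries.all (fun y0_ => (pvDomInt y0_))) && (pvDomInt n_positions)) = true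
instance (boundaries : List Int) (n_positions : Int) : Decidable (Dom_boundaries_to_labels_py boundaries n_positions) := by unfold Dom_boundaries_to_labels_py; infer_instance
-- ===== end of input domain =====

-- B replaces A's per-position scan of the sorted boundary list by a single pass over the
-- sorted boundaries that emits each constant-label run at once: faster for many positions.

-- ===== PORT A =====
-- literal port of A: sorted(set(boundaries)), then a loop over range(1, n_positions+1)
-- carrying the running counter c and the labels list.
def boundaries_to_labels_py (boundaries : List Int) (n_positions : Int) : List Int :=
  if boundaries = [] then PySem.List.pyRange 0 n_positions 1
  else
    let sb := PySem.List.sorted (PySem.Set.ofList boundaries) (fun x => x) false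
    let st := (PySem.List.pyRange 1 (n_positions + 1) 1).foldl
      (fun (st : List Int × Int) pos =>
        (st.1 ++ [if pos ∈ sb then st.2 + 1 else st.2], if pos ∈ sb then st.2 + 1 else st.2))
      ([], 0)
    st.1

-- ===== PORT B =====
-- the loop of Source B over the sorted distinct boundaries: state (labels, c, prev);
-- 'continue' for b < 1, 'break' for b > n, else extend labels with the run [c] * (b - prev).
def btlRuns (n : Int) : List Int → List Int → Int → Int → List Int × Int × Int
  | [], labels, c, prev => (labels, c, prev)
  | b :: rest, labels, c, prev =>
    if b < 1 then btlRuns n rest labels c prev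
    else if b > n then (labels, c, prev)
    else btlRuns n rest (labels ++ List.replicate (b - prev).toNat c) (c + 1) b

def boundaries_to_labels_py_alt (boundaries : List Int) (n_positions : Int) : List Int :=
  if boundaries = [] then PySem.List.pyRange 0 n_positions 1
  else
    let sb := PySem.List.sorted (PySem.Set.ofList boundaries) (fun x => x) false
    let st := btlRuns n_positions sb [] 0 1
    st.1 ++ List.replicate (n_positions - st.2.2 + 1).toNat st.2.1

-- ===== PRECONDITION & SPEC =====
def Spec_boundaries_to_labels_py (boundaries : List Int) (n_positions : Int) (out : List Int) : Prop := out = boundaries_to_labels_py_alt boundaries n_positions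
instance (boundaries : List Int) (n_positions : Int) (out : List Int) : Decidable (Spec_boundaries_to_labels_py boundaries n_positions out) := by unfold Spec_boundaries_to_labels_py; infer_instance

-- ===== CLAIM (what is proved, stated in full; the proofs are below) =====
def Claim_equal_boundaries_to_labels_py : Prop := ∀ (boundaries : List Int) (n_positions : Int), Dom_boundaries_to_labels_py boundaries n_positions → Spec_boundaries_to_labels_py boundaries n_positions (boundaries_to_labels_py boundaries n_positions)

-- ===== LEMMAS AND PROOFS =====

-- number of distinct boundaries lying in [1, pos]
def btlCnt (l : List Int) (p : Int) : Int := (l.countP (fun b => decide (1 ≤ b ∧ b ≤ p)) : Int)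

lemma btlCnt_nil (p : Int) : btlCnt [] p = 0 := rfl

lemma btlCnt_cons (b : Int) (l : List Int) (p : Int) :
    btlCnt (b :: l) p = (if 1 ≤ b ∧ b ≤ p then 1 else 0) + btlCnt l p := by
  unfold btlCnt
  rw [List.countP_cons]
  by_cases h : 1 ≤ b ∧ b ≤ p <;> simp [h]
  omega

lemma btlCnt_nonpos (l : List Int) (p : Int) (hp : p ≤ 0) : btlCnt l p = 0 := by
  unfold btlCnt
  rw [List.countP_eq_zero.mpr (by intro b _; simp; omega)]
  rfl

lemma btlCnt_zero_of_forall (l : List Int) (p : Int) (h : ∀ b ∈ l, ¬ (1 ≤ b ∧ b ≤ p)) :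
    btlCnt l p = 0 := by
  unfold btlCnt
  rw [List.countP_eq_zero.mpr (by intro b hb; simpa using h b hb)]
  rfl

lemma btlCnt_step (l : List Int) (p : Int) (hp : 0 ≤ p) (hnd : l.Nodup) :
    btlCnt l (p + 1) = btlCnt l p + (if (p + 1) ∈ l then 1 else 0) := by
  induction l with
  | nil => simp [btlCnt_nil]
  | cons b t ih =>
    rcases List.nodup_cons.mp hnd with ⟨hb, ht⟩
    rw [btlCnt_cons, btlCnt_cons, ih ht]
    by_cases hbe : b = p + 1
    · subst hbe
      rw [if_pos (by omega : 1 ≤ p + 1 ∧ p + 1 ≤ p + 1),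
          if_neg (by omega : ¬(1 ≤ p + 1 ∧ p + 1 ≤ p)), if_neg hb, if_pos (by simp)]
      omega
    · have h1 : ((p + 1) ∈ b :: t) ↔ ((p + 1) ∈ t) := by simp [Ne.symm hbe]
      rw [if_congr h1 rfl rfl, if_congr (show (1 ≤ b ∧ b ≤ p + 1) ↔ (1 ≤ b ∧ b ≤ p) by omega) rfl rfl]
      split_ifs <;> omega

lemma map_const_pyRange (a b c : Int) :
    (PySem.List.pyRange a b 1).map (fun _ => c) = List.replicate (b - a).toNat c := by
  rw [PySem.List.pyRange_one, List.map_map]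
  have : ((fun _ => c) ∘ fun k : Nat => a + (k : Int)) = fun _ => c := rfl
  rw [this, List.map_const', List.length_range]

-- A's loop computes, at each position, the count of distinct boundaries in [1, pos].
lemma foldA (sb : List Int) (hnd : sb.Nodup) :
    ∀ (k : Nat) (a m : Int) (acc : List Int) (c : Int), 1 ≤ a → k = (m - a).toNat →
      c = btlCnt sb (a - 1) →
      ((PySem.List.pyRange a m 1).foldl
        (fun (st : List Int × Int) pos =>
          (st.1 ++ [if pos ∈ sb then st.2 + 1 else st.2], if pos ∈ sb then st.2 + 1 else st.2))
        (acc, c)).1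
      = acc ++ (PySem.List.pyRange a m 1).map (fun pos => btlCnt sb pos) := by
  intro k
  induction k with
  | zero =>
    intro a m acc c ha hk hc
    rw [PySem.List.pyRange_one_eq_nil (by omega)]
    simp
  | succ k ih =>
    intro a m acc c ha hk hc
    have hlt : a < m := by omega
    rw [PySem.List.pyRange_one_cons hlt]
    simp only [List.foldl_cons, List.map_cons]
    have hstep : (if a ∈ sb then c + 1 else c) = btlCnt sb a := by
      have := btlCnt_step sb (a - 1) (by omega) hnd
      rw [show a - 1 + 1 = a by omega] at this
      rw [this, hc]
      split_ifs <;> omega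
    rw [hstep]
    have := ih (a + 1) m (acc ++ [btlCnt sb a]) (btlCnt sb a)
      (by omega) (by omega) (by rw [show a + 1 - 1 = a by omega])
    simpa using this

-- appending to the labels accumulator commutes with btlRuns
lemma btlRuns_acc (n : Int) (l : List Int) :
    ∀ (acc : List Int) (c prev : Int),
      btlRuns n l acc c prev
        = (acc ++ (btlRuns n l [] c prev).1, (btlRuns n l [] c prev).2) := by
  induction l with
  | nil => intro acc c prev; simp [btlRuns]
  | cons b rest ih =>
    intro acc c prev
    by_cases h1 : b < 1
    · simp only [btlRuns, if_pos h1]; exact ih acc c prev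
    · by_cases h2 : b > n
      · simp [btlRuns, h1, h2]
      · simp only [btlRuns, if_neg h1, if_neg h2, List.nil_append]
        rw [ih (acc ++ List.replicate (b - prev).toNat c) (c + 1) b,
            ih (List.replicate (b - prev).toNat c) (c + 1) b]
        simp

-- B's run construction, from state (c, prev), produces exactly the per-position counts.
lemma runsB (n : Int) :
    ∀ (l : List Int) (prev c : Int), l.Pairwise (· < ·) → 1 ≤ prev →
      (∀ b ∈ l, b < 1 ∨ prev ≤ b) →
      (btlRuns n l [] c prev).1
        ++ List.replicate (n - (btlRuns n l [] c prev).2.2 + 1).toNat (btlRuns n l [] c prev).2.1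
      = (PySem.List.pyRange prev (n + 1) 1).map (fun pos => c + btlCnt l pos) := by
  intro l
  induction l with
  | nil =>
    intro prev c _ hprev _
    simp only [btlRuns, List.nil_append]
    have h1 : (PySem.List.pyRange prev (n + 1) 1).map (fun pos => c + btlCnt ([] : List Int) pos)
        = (PySem.List.pyRange prev (n + 1) 1).map (fun _ => c) :=
      List.map_congr_left (by intro x _; rw [btlCnt_nil]; omega)
    rw [h1, map_const_pyRange]
    congr 1
    omega
  | cons b rest ih =>
    intro prev c hpw hprev hlb
    rcases List.pairwise_cons.mp hpw with ⟨hblt, hrest⟩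
    by_cases h1 : b < 1
    · simp only [btlRuns, if_pos h1]
      rw [ih prev c hrest hprev (by intro x hx; exact hlb x (List.mem_cons_of_mem b hx))]
      apply List.map_congr_left
      intro pos _
      rw [btlCnt_cons, if_neg (by omega)]
      omega
    · by_cases h2 : b > n
      · simp only [btlRuns, if_neg h1, if_pos h2, List.nil_append]
        have hz : (PySem.List.pyRange prev (n + 1) 1).map (fun pos => c + btlCnt (b :: rest) pos)
            = (PySem.List.pyRange prev (n + 1) 1).map (fun _ => c) := by
          apply List.map_congr_left
          intro pos hpos
          rw [PySem.List.mem_pyRange_one] at hpos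
          rw [btlCnt_cons, if_neg (by omega),
              btlCnt_zero_of_forall rest pos (by intro x hx; have := hblt x hx; omega)]
          omega
        rw [hz, map_const_pyRange]
        congr 1
        omega
      · simp only [btlRuns, if_neg h1, if_neg h2, List.nil_append]
        rw [btlRuns_acc]
        have hpb : prev ≤ b := by rcases hlb b List.mem_cons_self with h | h <;> omega
        rw [List.append_assoc,
            ih b (c + 1) hrest (by omega) (by intro x hx; right; have := hblt x hx; omega),
            PySem.List.pyRange_one_append prev b (n + 1) hpb (by omega), List.map_append]
        congr 1
        · have hz : (PySem.List.pyRange prev b 1).map (fun pos => c + btlCnt (b :: rest) pos)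
              = (PySem.List.pyRange prev b 1).map (fun _ => c) := by
            apply List.map_congr_left
            intro pos hpos
            rw [PySem.List.mem_pyRange_one] at hpos
            rw [btlCnt_cons, if_neg (by omega),
                btlCnt_zero_of_forall rest pos (by intro x hx; have := hblt x hx; omega)]
            omega
          rw [hz, map_const_pyRange]
        · apply List.map_congr_left
          intro pos hpos
          rw [PySem.List.mem_pyRange_one] at hpos
          rw [btlCnt_cons, if_pos (by omega)]
          omega

-- ===== VERDICT (by name: the statement is the Claim_ definition above) =====
theorem boundaries_to_labels_py_spec : Claim_equal_boundaries_to_labels_py := by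
  intro boundaries n_positions _
  unfold Spec_boundaries_to_labels_py boundaries_to_labels_py boundaries_to_labels_py_alt
  by_cases hb : boundaries = []
  · simp [hb]
  · simp only [if_neg hb]
    set sb := PySem.List.sorted (PySem.Set.ofList boundaries) (fun x => x) false with hsb
    have hpw : sb.Pairwise (· < ·) := PySem.List.sorted_ofList_pairwise_lt boundaries
    have hnd : sb.Nodup := hpw.nodup
    rw [foldA sb hnd (n_positions + 1 - 1).toNat 1 (n_positions + 1) [] 0 le_rfl rfl
        (by rw [show (1 : Int) - 1 = 0 by omega, btlCnt_nonpos sb 0 le_rfl])]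
    rw [runsB n_positions sb 1 0 hpw le_rfl (by intro b _; omega)]
    simp
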